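-- pv_equiv track=rewrite | github.com/got4b/TIS-Innovation-LDA-Sentiment | python/ProcessingFunctions.py | ParagraphSplitter
-- ===== SOURCE A (Python) =====
-- def ParagraphSplitter(listOfPars, splitAt):
--     """
--     Remove text which defines end of articles;
--     Strings = 'graphic', 'foto: classification language', 'classification language', 'kommentar seite '
--     """
--     splitPars, splitHere = [], False
--     for par in listOfPars:
--         for splitstring in splitAt:
--             if splitstring in par:
--                 splitHere = True
--         if not splitHere:
--             splitPars.append(par)
--         else:
--             break
--     return splitPars
-- ===== SOURCE B (Python) =====
-- def ParagraphSplitter(listOfPars, splitAt):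
--     # Walk the paragraphs from the END toward the front, building the result
--     # back-to-front: a paragraph containing a split marker discards everything
--     # collected so far (it and anything after it can never be in the kept
--     # prefix), otherwise the paragraph is kept.  kept holds the survivors in
--     # back-to-front order, so the final answer is its reversal: exactly the
--     # prefix of paragraphs before the first marker-containing one.
--     kept = []
--     for par in reversed(listOfPars):
--         if any(s in par for s in splitAt):
--             kept.clear()
--         else:
--             kept.append(par)
--     return kept[::-1]
-- ===== Notes on version B (the rewrite author's own statement) =====
-- stated objective: alternative
-- what changed: Traverses the paragraphs in REVERSE, collecting survivors back-to-front and clearing the collection at every marker-containing paragraph, then reverses the result; no flag, no break, opposite traversal order to A's forward flag-and-break loop.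
import Mathlib
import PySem

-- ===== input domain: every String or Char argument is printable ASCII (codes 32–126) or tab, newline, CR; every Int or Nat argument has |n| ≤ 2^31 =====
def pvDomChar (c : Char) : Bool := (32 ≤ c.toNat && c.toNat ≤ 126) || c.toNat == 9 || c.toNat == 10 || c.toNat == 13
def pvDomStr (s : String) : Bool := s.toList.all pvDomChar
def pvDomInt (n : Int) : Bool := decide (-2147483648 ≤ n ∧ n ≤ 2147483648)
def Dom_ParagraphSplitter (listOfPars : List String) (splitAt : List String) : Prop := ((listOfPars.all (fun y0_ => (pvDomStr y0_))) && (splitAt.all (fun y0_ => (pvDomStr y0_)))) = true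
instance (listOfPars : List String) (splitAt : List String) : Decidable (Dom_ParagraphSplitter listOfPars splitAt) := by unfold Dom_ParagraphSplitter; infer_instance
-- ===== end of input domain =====

-- B traverses the paragraphs in reverse, building the result back-to-front and resetting it at each marker paragraph, instead of A's forward flag-and-break loop (alternative decomposition, same cost class).


-- ===== PORT A =====
-- loop over paragraphs carrying (splitPars, splitHere); inner loop sets the flag, then append-or-break
def ParagraphSplitter_loop (splitAt : List String) (splitPars : List String) (splitHere : Bool) : List String → List String
  | [] => splitPars
  | par :: rest =>
    let sh := splitAt.foldl (fun h splitstring => if PySem.Str.isIn splitstring par then true else h) splitHere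
    if !sh then ParagraphSplitter_loop splitAt (splitPars ++ [par]) sh rest else splitPars

def ParagraphSplitter (listOfPars : List String) (splitAt : List String) : List String :=
  ParagraphSplitter_loop splitAt [] false listOfPars

-- ===== PORT B =====
-- reverse traversal: Source B loops over reversed(listOfPars) (a foldl over the reversed list),
-- clearing kept at a marker paragraph and appending otherwise; the result is kept reversed
def ParagraphSplitter_alt (listOfPars : List String) (splitAt : List String) : List String :=
  (listOfPars.reverse.foldl
    (fun kept par => if splitAt.any (fun s => PySem.Str.isIn s par) then [] else kept ++ [par])
    []).reverse

-- ===== PRECONDITION & SPEC =====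
def Spec_ParagraphSplitter (listOfPars : List String) (splitAt : List String) (out : List String) : Prop := out = ParagraphSplitter_alt listOfPars splitAt
instance (listOfPars : List String) (splitAt : List String) (out : List String) : Decidable (Spec_ParagraphSplitter listOfPars splitAt out) := by unfold Spec_ParagraphSplitter; infer_instance

-- ===== CLAIM =====
def Claim_equal_ParagraphSplitter : Prop := ∀ (listOfPars : List String) (splitAt : List String), Dom_ParagraphSplitter listOfPars splitAt → Spec_ParagraphSplitter listOfPars splitAt (ParagraphSplitter listOfPars splitAt)

-- ===== LEMMAS AND PROOFS =====
theorem flag_foldl_eq_any (par : String) (l : List String) (b : Bool) :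
    l.foldl (fun h splitstring => if PySem.Str.isIn splitstring par then true else h) b
      = (b || l.any (fun s => PySem.Str.isIn s par)) := by
  induction l generalizing b with
  | nil => simp
  | cons x xs ih =>
    simp only [List.foldl_cons, List.any_cons, ih]
    cases b <;> by_cases h : PySem.Str.isIn x par = true <;> simp_all

theorem alt_eq_foldr (splitAt : List String) (xs : List String) :
    ParagraphSplitter_alt xs splitAt
      = xs.foldr
          (fun par kept => if splitAt.any (fun s => PySem.Str.isIn s par) then [] else par :: kept)
          [] := by
  induction xs with
  | nil => simp [ParagraphSplitter_alt]
  | cons par rest ih =>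
    simp only [ParagraphSplitter_alt, List.reverse_cons, List.foldl_append, List.foldl_cons,
      List.foldl_nil, List.foldr_cons] at ih ⊢
    by_cases h : (splitAt.any fun s => PySem.Str.isIn s par) = true
    · rw [if_pos h, if_pos h]; rfl
    · rw [if_neg h, if_neg h, List.reverse_append, ih]; rfl

theorem loop_eq_foldr (splitAt : List String) (xs acc : List String) :
    ParagraphSplitter_loop splitAt acc false xs = acc ++ ParagraphSplitter_alt xs splitAt := by
  induction xs generalizing acc with
  | nil => simp [ParagraphSplitter_loop, ParagraphSplitter_alt]
  | cons par rest ih =>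
    simp only [ParagraphSplitter_loop, alt_eq_foldr, List.foldr_cons, flag_foldl_eq_any,
      Bool.false_or]
    by_cases h : (splitAt.any fun s => PySem.Str.isIn s par) = true
    · rw [h]; simp
    · rw [eq_false_of_ne_true h]
      simpa [alt_eq_foldr] using ih (acc ++ [par])

-- ===== VERDICT =====
theorem ParagraphSplitter_spec : Claim_equal_ParagraphSplitter := by
  intro listOfPars splitAt _
  unfold Spec_ParagraphSplitter ParagraphSplitter
  simpa using loop_eq_foldr splitAt listOfPars []
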